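-- pv_equiv track=rewrite | github.com/temp3rr0r/RoboticArm | components/PathPlanning/src/try_solver.py | get_additional_points
-- ===== SOURCE A (Python) =====
-- def get_total_path_length(x, n):
--     return n + (n - 1) * round(x, 0)  # y = n + (n - 1) * x
--
-- def get_additional_points(path, min_path_length=5, max_additional_points=10):
--     n = len(path)
--     additional_points = 0
--     while get_total_path_length(additional_points, n) < min_path_length:
--         additional_points = additional_points + 1
--         if additional_points > max_additional_points:
--             break
--     return additional_points
-- ===== SOURCE B (Python) =====
-- def get_additional_points(path, min_path_length=5, max_additional_points=10):
--     n = len(path)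
--     if n >= min_path_length:
--         return 0
--     if n <= 1:
--         # no segments to subdivide: the cap is all we can offer
--         return max_additional_points
--     # smallest k with n + (n-1)*k >= min_path_length, capped at the maximum
--     k = -((n - min_path_length) // (n - 1))
--     return min(k, max_additional_points)
-- ===== Notes on version B (the rewrite author's own statement) =====
-- stated objective: simpler
-- what changed: Replaces the incrementing while-loop with a closed form: 0 if the path already reaches min_path_length, otherwise the ceiling division ceil((min_path_length-n)/(n-1)) capped at max_additional_points (the cap alone when n<=1 leaves nothing to subdivide).
-- intended difference: When the path has at most one point or even max_additional_points extra points cannot reach min_path_length, A overshoots its own cap and returns max_additional_points+1 (or 1 when the cap is below zero); B returns max_additional_points, the stated maximum, which is the intended cap. — e.g. on get_additional_points([1, 2], 100, 3): A returns 4, B returns 3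
import Mathlib
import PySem

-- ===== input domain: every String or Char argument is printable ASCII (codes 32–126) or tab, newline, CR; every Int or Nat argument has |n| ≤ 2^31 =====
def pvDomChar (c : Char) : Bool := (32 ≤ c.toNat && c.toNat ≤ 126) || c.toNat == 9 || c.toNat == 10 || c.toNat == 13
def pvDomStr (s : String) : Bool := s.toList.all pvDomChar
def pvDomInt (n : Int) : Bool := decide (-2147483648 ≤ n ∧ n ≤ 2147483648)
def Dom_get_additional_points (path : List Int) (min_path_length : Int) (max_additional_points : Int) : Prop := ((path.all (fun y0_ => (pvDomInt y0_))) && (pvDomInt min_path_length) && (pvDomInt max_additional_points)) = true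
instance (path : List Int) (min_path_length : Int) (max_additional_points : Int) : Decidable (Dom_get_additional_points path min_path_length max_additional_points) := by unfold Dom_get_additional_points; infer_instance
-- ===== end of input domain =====

-- B replaces A's incrementing while-loop with a closed-form ceiling-division answer capped at max_additional_points; objective: simpler. Where the cap binds, A returns one more than its stated maximum; B returns the maximum (see D_ below).


-- ===== PORT A =====
-- round(x, 0) on a Python int is the identity
def get_total_path_length (x : Int) (n : Int) : Int := n + (n - 1) * x

-- A's while loop; the Nat fuel only makes the recursion structural: fuel = max_additional_points.toNat + 2
-- is proved sufficient below (the loop exits by the cap or the guard before the fuel runs out)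
def gapLoop (n min_path_length max_additional_points : Int) : Nat → Int → Int
  | 0, additional_points => additional_points
  | fuel + 1, additional_points =>
    if get_total_path_length additional_points n < min_path_length then
      let ap' := additional_points + 1
      if ap' > max_additional_points then ap'
      else gapLoop n min_path_length max_additional_points fuel ap'
    else additional_points

def get_additional_points (path : List Int) (min_path_length : Int) (max_additional_points : Int) : Int :=
  gapLoop (path.length : Int) min_path_length max_additional_points (max_additional_points.toNat + 2) 0

-- ===== PORT B =====
def get_additional_points_alt (path : List Int) (min_path_length : Int) (max_additional_points : Int) : Int :=
  let n : Int := path.length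
  if n ≥ min_path_length then 0
  else if n ≤ 1 then max_additional_points
  else
    let k := -(PySem.Int.floordiv (n - min_path_length) (n - 1))
    min k max_additional_points

-- ===== PRECONDITION & SPEC =====
-- When the path has at most one point or even max_additional_points extra points cannot reach
-- min_path_length, A overshoots its own cap and returns max_additional_points+1 (or 1 when the cap is
-- below zero); B returns max_additional_points, the stated maximum, which is the intended cap.
def D_get_additional_points (path : List Int) (min_path_length : Int) (max_additional_points : Int) : Prop :=
  (path.length : Int) < min_path_length ∧
    (path.length ≤ 1 ∨
      (path.length : Int) + ((path.length : Int) - 1) * max_additional_points < min_path_length)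
instance (path : List Int) (min_path_length : Int) (max_additional_points : Int) : Decidable (D_get_additional_points path min_path_length max_additional_points) := by unfold D_get_additional_points; infer_instance

def Spec_get_additional_points (path : List Int) (min_path_length : Int) (max_additional_points : Int) (out : Int) : Prop := ¬ D_get_additional_points path min_path_length max_additional_points → out = get_additional_points_alt path min_path_length max_additional_points
instance (path : List Int) (min_path_length : Int) (max_additional_points : Int) (out : Int) : Decidable (Spec_get_additional_points path min_path_length max_additional_points out) := by unfold Spec_get_additional_points; infer_instance

def pvDiffWitness_get_additional_points : List Int × Int × Int := ([1, 2], 100, 3)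
def pvDiffWitnessOut_get_additional_points : Int × Int := (4, 3)

-- ===== CLAIM (what is proved, stated in full; the proofs are below) =====
def Claim_unchanged_get_additional_points : Prop := ∀ (path : List Int) (min_path_length : Int) (max_additional_points : Int), Dom_get_additional_points path min_path_length max_additional_points → Spec_get_additional_points path min_path_length max_additional_points (get_additional_points path min_path_length max_additional_points)
def Claim_changed_get_additional_points : Prop := Dom_get_additional_points (pvDiffWitness_get_additional_points.1) (pvDiffWitness_get_additional_points.2.1) (pvDiffWitness_get_additional_points.2.2) ∧ D_get_additional_points (pvDiffWitness_get_additional_points.1) (pvDiffWitness_get_additional_points.2.1) (pvDiffWitness_get_additional_points.2.2) ∧ get_additional_points (pvDiffWitness_get_additional_points.1) (pvDiffWitness_get_additional_points.2.1) (pvDiffWitness_get_additional_points.2.2) = pvDiffWitnessOut_get_additional_points.1 ∧ get_additional_points_alt (pvDiffWitness_get_additional_points.1) (pvDiffWitness_get_additional_points.2.1) (pvDiffWitness_get_additional_points.2.2) = pvDiffWitnessOut_get_additional_points.2 ∧ pvDiffWitnessOut_get_additional_points.1 ≠ pvDiffWitnessOut_get_additional_points.2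
def Claim_exact_get_additional_points : Prop := ∀ (path : List Int) (min_path_length : Int) (max_additional_points : Int), Dom_get_additional_points path min_path_length max_additional_points → D_get_additional_points path min_path_length max_additional_points → get_additional_points path min_path_length max_additional_points ≠ get_additional_points_alt path min_path_length max_additional_points

-- ===== LEMMAS AND PROOFS =====

-- main case: K is the least k with n + (n-1)k ≥ m (hK); with enough fuel the loop computes
-- min K (max (M+1) (ap+1)) from state ap (for M ≥ 0; M < 0 is handled directly at the call site)
lemma gapLoop_main (n m M K : Int) (hM : 0 ≤ M)
    (hK : ∀ ap : Int, get_total_path_length ap n < m ↔ ap < K) :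
    ∀ (fuel : Nat) (ap : Int), ap ≤ M + 1 → (min (K + 1) (M + 2) - ap).toNat ≤ fuel →
      gapLoop n m M fuel ap = if K ≤ ap then ap else min K (max (M + 1) (ap + 1)) := by
  intro fuel
  induction fuel with
  | zero =>
      intro ap hap hf
      have hKa : K ≤ ap := by omega
      simp only [gapLoop]
      rw [if_pos hKa]
  | succ fuel ih =>
      intro ap hap hf
      simp only [gapLoop]
      by_cases hg : get_total_path_length ap n < m
      · have hapK : ap < K := (hK ap).mp hg
        rw [if_pos hg]
        by_cases hcap : ap + 1 > M
        · rw [if_pos hcap, if_neg (by omega)]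
          omega
        · rw [if_neg hcap, ih (ap + 1) (by omega) (by omega)]
          split_ifs <;> omega
      · have hKa : K ≤ ap := not_lt.mp (fun h => hg ((hK ap).mpr h))
        rw [if_neg hg, if_pos hKa]

-- degenerate case n ≤ 1: the guard holds for every ap ≥ 0, the loop stops only at the cap (M ≥ 0)
lemma gapLoop_degen (n m M : Int)
    (hg : ∀ ap : Int, 0 ≤ ap → get_total_path_length ap n < m) :
    ∀ (fuel : Nat) (ap : Int), 0 ≤ ap → ap ≤ M + 1 → (M + 2 - ap).toNat ≤ fuel →
      gapLoop n m M fuel ap = max (M + 1) (ap + 1) := by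
  intro fuel
  induction fuel with
  | zero => intro ap h0 hap hf; simp only [gapLoop]; omega
  | succ fuel ih =>
      intro ap h0 hap hf
      simp only [gapLoop]
      rw [if_pos (hg ap h0)]
      by_cases hcap : ap + 1 > M
      · rw [if_pos hcap]; omega
      · rw [if_neg hcap, ih (ap + 1) (by omega) (by omega) (by omega)]
        omega

-- the guard characterised by the ceiling division B uses
lemma guard_iff (n m : Int) (hn : 2 ≤ n) (ap : Int) :
    get_total_path_length ap n < m ↔ ap < -(PySem.Int.floordiv (n - m) (n - 1)) := by
  have h := PySem.Int.le_floordiv_iff_mul_le (a := n - m) (b := n - 1) (q := -ap) (by omega)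
  simp only [get_total_path_length]
  constructor
  · intro hlt
    by_contra hc
    push Not at hc
    have h2 : -ap ≤ PySem.Int.floordiv (n - m) (n - 1) := by omega
    have h3 := h.mp h2
    nlinarith
  · intro hlt
    by_contra hc
    push Not at hc
    have h2 : -ap * (n - 1) ≤ n - m := by nlinarith
    have h3 := h.mpr h2
    omega

-- A's value in the degenerate case
lemma a_degen (path : List Int) (m M : Int) (h1 : (path.length : Int) ≤ 1) (hlt : (path.length : Int) < m) :
    get_additional_points path m M = max (M + 1) 1 := by
  have hg : ∀ ap : Int, 0 ≤ ap → get_total_path_length ap (path.length : Int) < m := by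
    intro ap hap
    have h2 : ((path.length : Int) - 1) * ap ≤ 0 := mul_nonpos_of_nonpos_of_nonneg (by omega) hap
    simp only [get_total_path_length]
    omega
  unfold get_additional_points
  by_cases hM : 0 ≤ M
  · rw [gapLoop_degen (path.length : Int) m M hg (M.toNat + 2) 0 le_rfl (by omega) (by omega)]
    omega
  · have hfuel : M.toNat + 2 = 2 := by omega
    rw [hfuel]
    simp only [gapLoop]
    rw [if_pos (hg 0 le_rfl), if_pos (by omega)]
    omega

-- both sides evaluated in the non-degenerate main case (used by the unchanged and the exact theorem)
lemma main_values (path : List Int) (m M : Int) (h1 : 2 ≤ (path.length : Int)) (hlt : (path.length : Int) < m) :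
    get_additional_points path m M = min (-(PySem.Int.floordiv ((path.length : Int) - m) ((path.length : Int) - 1))) (max (M + 1) 1) ∧
    get_additional_points_alt path m M = min (-(PySem.Int.floordiv ((path.length : Int) - m) ((path.length : Int) - 1))) M := by
  set n : Int := (path.length : Int) with hn
  set K := -(PySem.Int.floordiv (n - m) (n - 1)) with hKdef
  have hK0 : 0 < K := by
    have := (guard_iff n m h1 0).mp (by simp [get_total_path_length]; omega)
    omega
  constructor
  · unfold get_additional_points
    by_cases hM : 0 ≤ M
    · rw [gapLoop_main n m M K hM (guard_iff n m h1) (M.toNat + 2) 0 (by omega) (by omega)]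
      rw [if_neg (by omega)]
      omega
    · have hfuel : M.toNat + 2 = 2 := by omega
      rw [hfuel]
      simp only [gapLoop]
      rw [if_pos ((guard_iff n m h1 0).mpr hK0), if_pos (by omega)]
      omega
  · unfold get_additional_points_alt
    rw [if_neg (by omega), if_neg (by omega)]

-- K > M iff the cap binds (the arithmetic side of D_)
lemma cap_iff (path : List Int) (m M : Int) (h1 : 2 ≤ (path.length : Int)) :
    ((path.length : Int) + ((path.length : Int) - 1) * M < m ↔
      M < -(PySem.Int.floordiv ((path.length : Int) - m) ((path.length : Int) - 1))) :=
  guard_iff (path.length : Int) m h1 M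

-- ===== VERDICT (by name: the statement is the Claim_ definition above) =====
theorem get_additional_points_spec : Claim_unchanged_get_additional_points := by
  intro path m M _
  unfold Spec_get_additional_points
  intro hD
  unfold D_get_additional_points at hD
  push Not at hD
  have hn0 : (0 : Int) ≤ (path.length : Int) := by positivity
  by_cases hge : (path.length : Int) ≥ m
  · have hA : get_additional_points path m M = 0 := by
      unfold get_additional_points
      simp only [gapLoop]
      rw [if_neg (by simp only [get_total_path_length]; omega)]
    have hB : get_additional_points_alt path m M = 0 := by
      simp only [get_additional_points_alt]
      rw [if_pos hge]
    rw [hA, hB]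
  · have hlt : (path.length : Int) < m := by omega
    obtain ⟨hgt1, hcap⟩ := hD hlt
    have h1 : 2 ≤ (path.length : Int) := by omega
    obtain ⟨hA, hB⟩ := main_values path m M h1 hlt
    rw [hA, hB]
    have hKM := cap_iff path m M h1
    omega

theorem get_additional_points_changed : Claim_changed_get_additional_points := by
  unfold Claim_changed_get_additional_points
  decide

theorem get_additional_points_tight : Claim_exact_get_additional_points := by
  intro path m M _ hD
  obtain ⟨hlt, hrest⟩ := hD
  have hn0 : (0 : Int) ≤ (path.length : Int) := by positivity
  by_cases h1 : (path.length : Int) ≤ 1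
  · rw [a_degen path m M h1 hlt]
    unfold get_additional_points_alt
    rw [if_neg (by omega), if_pos (by omega)]
    omega
  · have h2 : 2 ≤ (path.length : Int) := by omega
    have hcap : (path.length : Int) + ((path.length : Int) - 1) * M < m := by
      rcases hrest with h | h
      · omega
      · exact h
    obtain ⟨hA, hB⟩ := main_values path m M h2 hlt
    rw [hA, hB]
    have hKM := (cap_iff path m M h2).mp hcap
    have hK0 : 0 < -(PySem.Int.floordiv ((path.length : Int) - m) ((path.length : Int) - 1)) := by
      have := (guard_iff (path.length : Int) m h2 0).mp (by simp [get_total_path_length]; omega)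
      omega
    omega
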